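-- pv_equiv track=rewrite | github.com/dimtsi/AoC2024 | Day15/run.py | can_move_h
-- ===== SOURCE A (Python) =====
-- def can_move_h(r, c, dc, visited, B, H):
--     assert (r, c) in B, "Wrong invocation"
--     visited.add((r, c))
--     cc = c + 2 * dc
--
--     if (dc == 1 and (r, cc) in H) or (dc == -1 and (r, c - 1) in H):
--         return False
--
--     if (r, cc) in B:
--         return can_move_h(r, cc, dc, visited, B, H)
--     return True
-- ===== SOURCE B (Python) =====
-- def can_move_h(r, c, dc, visited, B, H):
--     assert (r, c) in B, "Wrong invocation"
--     # Phase 1: materialise the whole box chain (ignoring walls).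
--     chain = [c]
--     while (r, chain[-1] + 2 * dc) in B:
--         chain.append(chain[-1] + 2 * dc)
--     for x in chain:
--         visited.add((r, x))
--     # Phase 2: blocked iff some chain cell has a wall on its pushing side.
--     if dc == 1:
--         return not any((r, x + 2) in H for x in chain)
--     if dc == -1:
--         return not any((r, x - 1) in H for x in chain)
--     return True
-- ===== Notes on version B (the rewrite author's own statement) =====
-- stated objective: alternative
-- what changed: B materialises the whole box chain in a first pass and then decides blockage with a single any() wall scan over the chain, instead of A's recursion that interleaves the wall test with the walk; equivalence is about the return value (B may add chain cells to visited that A skips after an early False).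
import Mathlib
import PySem

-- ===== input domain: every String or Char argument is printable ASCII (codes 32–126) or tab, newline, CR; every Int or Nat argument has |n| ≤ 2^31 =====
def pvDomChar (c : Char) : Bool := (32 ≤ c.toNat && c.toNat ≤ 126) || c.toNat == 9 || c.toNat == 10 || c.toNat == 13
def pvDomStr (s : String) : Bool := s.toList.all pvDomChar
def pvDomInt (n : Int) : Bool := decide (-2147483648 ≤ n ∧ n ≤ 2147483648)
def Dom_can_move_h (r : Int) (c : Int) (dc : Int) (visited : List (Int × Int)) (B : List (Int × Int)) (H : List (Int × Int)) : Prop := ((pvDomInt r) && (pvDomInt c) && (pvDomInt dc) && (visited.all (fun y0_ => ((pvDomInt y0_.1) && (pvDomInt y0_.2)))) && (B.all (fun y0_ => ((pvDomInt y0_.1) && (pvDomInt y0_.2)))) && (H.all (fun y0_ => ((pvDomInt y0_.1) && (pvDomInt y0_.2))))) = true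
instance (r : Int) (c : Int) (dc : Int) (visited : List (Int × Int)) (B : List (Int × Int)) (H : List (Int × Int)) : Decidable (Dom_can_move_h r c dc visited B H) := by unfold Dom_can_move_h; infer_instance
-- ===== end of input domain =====

-- B replaces A's wall-test-while-walking recursion by two phases: build the full box chain,
-- then a single any() wall scan (objective: alternative). Both Pythons mutate `visited` in
-- place; the theorems here are about the RETURN VALUE only (after an early False, A stops
-- adding chain cells to `visited` while B has already added the whole chain).

-- ===== PORT A =====
-- A recurses with c := c + 2*dc while the next cell is a box; the assert is re-checked at every
-- level. Fuel B.length + 1 bounds the recursion: under Pre_ (dc ≠ 0) the visited chain cells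
-- are distinct members of B, so the fuel is never exhausted on admitted inputs.
def canMoveHGo (dc : Int) (B H : List (Int × Int)) : Nat → Int → Int → List (Int × Int) → Bool
  | 0, _, _, _ => false
  | Nat.succ fuel, r, c, visited =>
    if (r, c) ∈ B then  -- assert (r, c) in B  (holds on every call reached under Pre_)
      let visited := PySem.Set.add visited (r, c)
      let cc := c + 2 * dc
      if (dc = 1 ∧ (r, cc) ∈ H) ∨ (dc = -1 ∧ (r, c - 1) ∈ H) then false
      else if (r, cc) ∈ B then canMoveHGo dc B H fuel r cc visited
      else true
    else false  -- AssertionError: unreachable under Pre_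

def can_move_h (r : Int) (c : Int) (dc : Int) (visited : List (Int × Int)) (B : List (Int × Int)) (H : List (Int × Int)) : Bool :=
  canMoveHGo dc B H (B.length + 1) r c visited

-- ===== PORT B =====
-- Phase 1 of Source B: the chain-building while-loop (append while the next cell is a box).
-- Fuel B.length + 1 bounds it; under Pre_ (dc ≠ 0) the chain columns are distinct box
-- columns, so the fuel is never exhausted on admitted inputs.
def chainColsGo (r dc : Int) (B : List (Int × Int)) : Nat → Int → List Int
  | 0, c => [c]
  | Nat.succ fuel, c =>
    if (r, c + 2 * dc) ∈ B then c :: chainColsGo r dc B fuel (c + 2 * dc)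
    else [c]

def can_move_h_alt (r : Int) (c : Int) (dc : Int) (visited : List (Int × Int)) (B : List (Int × Int)) (H : List (Int × Int)) : Bool :=
  if (r, c) ∈ B then  -- assert (r, c) in B
    let chain := chainColsGo r dc B (B.length + 1) c
    let _ := chain.foldl (fun v x => PySem.Set.add v (r, x)) visited  -- visited-marking loop (mutation only)
    -- Phase 2 of Source B: one wall scan over the chain.
    if dc = 1 then !(chain.any (fun x => decide ((r, x + 2) ∈ H)))
    else if dc = -1 then !(chain.any (fun x => decide ((r, x - 1) ∈ H)))
    else true
  else false  -- AssertionError: unreachable under Pre_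

-- ===== PRECONDITION & SPEC =====
-- Pre_ excludes only inputs where A raises: (r, c) ∉ B fails the assert (AssertionError), and
-- dc = 0 makes A recurse on unchanged arguments forever (RecursionError); A returns elsewhere.
def Pre_can_move_h (r : Int) (c : Int) (dc : Int) (visited : List (Int × Int)) (B : List (Int × Int)) (H : List (Int × Int)) : Prop :=
  (r, c) ∈ B ∧ dc ≠ 0
instance (r : Int) (c : Int) (dc : Int) (visited : List (Int × Int)) (B : List (Int × Int)) (H : List (Int × Int)) : Decidable (Pre_can_move_h r c dc visited B H) := by unfold Pre_can_move_h; infer_instance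

def pvWitness_can_move_h : Int × Int × Int × (List (Int × Int)) × (List (Int × Int)) × (List (Int × Int)) := (0, 0, 1, [], [(0, 0)], [])

def Spec_can_move_h (r : Int) (c : Int) (dc : Int) (visited : List (Int × Int)) (B : List (Int × Int)) (H : List (Int × Int)) (out : Bool) : Prop := out = can_move_h_alt r c dc visited B H
instance (r : Int) (c : Int) (dc : Int) (visited : List (Int × Int)) (B : List (Int × Int)) (H : List (Int × Int)) (out : Bool) : Decidable (Spec_can_move_h r c dc visited B H out) := by unfold Spec_can_move_h; infer_instance

-- ===== CLAIM =====
def Claim_equal_can_move_h : Prop := ∀ (r : Int) (c : Int) (dc : Int) (visited : List (Int × Int)) (B : List (Int × Int)) (H : List (Int × Int)), Dom_can_move_h r c dc visited B H → Pre_can_move_h r c dc visited B H → Spec_can_move_h r c dc visited B H (can_move_h r c dc visited B H)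

-- ===== LEMMAS AND PROOFS =====

-- Potential: number of distinct boxes still ahead of column c (in the pushing direction).
def chainPot (r dc : Int) (B : List (Int × Int)) (c : Int) : Nat :=
  (B.toFinset.filter (fun p => p.1 = r ∧ (if 0 < dc then c ≤ p.2 else p.2 ≤ c))).card

theorem chainPot_pos (r dc : Int) (B : List (Int × Int)) (c : Int) (h : (r, c) ∈ B) :
    1 ≤ chainPot r dc B c := by
  apply Finset.card_pos.mpr
  exact ⟨(r, c), by simp [Finset.mem_filter, List.mem_toFinset, h]⟩

theorem chainPot_lt (r dc : Int) (B : List (Int × Int)) (c : Int)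
    (hdc : dc ≠ 0) (h : (r, c) ∈ B) :
    chainPot r dc B (c + 2 * dc) < chainPot r dc B c := by
  apply Finset.card_lt_card
  rw [Finset.ssubset_def]
  constructor
  · intro p hp
    simp only [Finset.mem_filter, List.mem_toFinset] at *
    rcases hp with ⟨hmem, hr, hcond⟩
    refine ⟨hmem, hr, ?_⟩
    split at hcond <;> split <;> omega
  · intro hsub
    have hmemc : (r, c) ∈ B.toFinset.filter
        (fun p => p.1 = r ∧ (if 0 < dc then c ≤ p.2 else p.2 ≤ c)) := by
      exact Finset.mem_filter.mpr ⟨List.mem_toFinset.mpr h, rfl, by split <;> omega⟩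
    have := hsub hmemc
    simp only [Finset.mem_filter, List.mem_toFinset] at this
    rcases this with ⟨-, -, hcond⟩
    split at hcond <;> omega

theorem chainPot_le (r dc : Int) (B : List (Int × Int)) (c : Int) :
    chainPot r dc B c ≤ B.length :=
  le_trans (Finset.card_filter_le _ _) B.toFinset_card_le

-- B's phase-2 scan, abstracted over the chain list.
def evalChain (r dc : Int) (H : List (Int × Int)) (chain : List Int) : Bool :=
  if dc = 1 then !(chain.any (fun x => decide ((r, x + 2) ∈ H)))
  else if dc = -1 then !(chain.any (fun x => decide ((r, x - 1) ∈ H)))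
  else true

-- Core: with enough fuel, A's recursion equals B's two-phase computation.
theorem go_eq_evalChain (r dc : Int) (B H : List (Int × Int)) (hdc : dc ≠ 0) :
    ∀ (fuel : Nat) (c : Int) (vis : List (Int × Int)), (r, c) ∈ B →
      chainPot r dc B c ≤ fuel →
      canMoveHGo dc B H fuel r c vis = evalChain r dc H (chainColsGo r dc B fuel c) := by
  intro fuel
  induction fuel with
  | zero =>
    intro c vis hmem hle
    exact absurd (le_trans (chainPot_pos r dc B c hmem) hle) (by omega)
  | succ n ih =>
    intro c vis hmem hle
    simp only [canMoveHGo, chainColsGo, if_pos hmem]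
    by_cases hnext : (r, c + 2 * dc) ∈ B
    · rw [if_pos hnext, if_pos hnext]
      by_cases hwall : (dc = 1 ∧ (r, c + 2 * dc) ∈ H) ∨ (dc = -1 ∧ (r, c - 1) ∈ H)
      · rw [if_pos hwall]
        rcases hwall with ⟨h1, hH⟩ | ⟨h1, hH⟩ <;>
          simp [evalChain, h1, List.any_cons] <;>
          simp_all
      · rw [if_neg hwall]
        have hrec := ih (c + 2 * dc) (PySem.Set.add vis (r, c)) hnext
          (by have := chainPot_lt r dc B c hdc hmem; omega)
        rw [hrec]
        unfold evalChain
        by_cases h1 : dc = 1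
        · subst h1
          have : ¬ ((r, c + 2) ∈ H) := by
            intro hH; exact hwall (Or.inl ⟨rfl, by simpa using hH⟩)
          simp [List.any_cons, this]
        · by_cases h2 : dc = -1
          · subst h2
            have : ¬ ((r, c - 1) ∈ H) := by
              intro hH; exact hwall (Or.inr ⟨rfl, hH⟩)
            simp [h1, List.any_cons, this]
          · simp [h1, h2]
    · rw [if_neg hnext, if_neg hnext]
      by_cases hwall : (dc = 1 ∧ (r, c + 2 * dc) ∈ H) ∨ (dc = -1 ∧ (r, c - 1) ∈ H)
      · rw [if_pos hwall]
        rcases hwall with ⟨h1, hH⟩ | ⟨h1, hH⟩ <;>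
          simp [evalChain, h1] <;> simp_all
      · rw [if_neg hwall]
        unfold evalChain
        by_cases h1 : dc = 1
        · subst h1
          have : ¬ ((r, c + 2) ∈ H) := by
            intro hH; exact hwall (Or.inl ⟨rfl, by simpa using hH⟩)
          simp [this]
        · by_cases h2 : dc = -1
          · subst h2
            have : ¬ ((r, c - 1) ∈ H) := by
              intro hH; exact hwall (Or.inr ⟨rfl, hH⟩)
            simp [h1, this]
          · simp [h1, h2]

-- ===== VERDICT =====
theorem can_move_h_spec : Claim_equal_can_move_h := by
  intro r c dc visited B H _ hpre
  unfold Spec_can_move_h can_move_h can_move_h_alt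
  rw [if_pos hpre.1]
  exact go_eq_evalChain r dc B H hpre.2 (B.length + 1) c visited hpre.1
    (by have := chainPot_le r dc B c; omega)
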